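-- pv_equiv track=rewrite | github.com/paulc-arc/testpilot | src/testpilot/reporting/log_capture.py | seq_range_to_line_range
-- ===== SOURCE A (Python) =====
-- def seq_range_to_line_range(
--     seq_start: int | None,
--     seq_end: int | None,
--     seq_to_line: dict[int, int],
-- ) -> str:
--     """Convert a seq range to line range string (e.g. 'L123-L456').
--
--     Returns empty string if mapping is insufficient.
--     """
--     if seq_start is None or seq_end is None:
--         return ""
--     if not seq_to_line:
--         return ""
--
--     start_line = seq_to_line.get(seq_start)
--     end_line = seq_to_line.get(seq_end)
--
--     if start_line is None:
--         seqs_at_or_after = [s for s in seq_to_line if s >= seq_start]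
--         if seqs_at_or_after:
--             start_line = seq_to_line[min(seqs_at_or_after)]
--     if end_line is None:
--         seqs_at_or_before = [s for s in seq_to_line if s <= seq_end]
--         if seqs_at_or_before:
--             end_line = seq_to_line[max(seqs_at_or_before)]
--
--     if start_line is None or end_line is None:
--         return ""
--     if start_line > end_line:
--         start_line, end_line = end_line, start_line
--     return f"L{start_line}-L{end_line}"
-- ===== SOURCE B (Python) =====
-- def seq_range_to_line_range(
--     seq_start,
--     seq_end,
--     seq_to_line,
-- ):
--     """Single pass over the mapping: track the direct hits and the nearest
--     at-or-after / at-or-before keys in one loop instead of building filtered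
--     key lists and taking min/max."""
--     if seq_start is None or seq_end is None or not seq_to_line:
--         return ""
--     sv = ev = after = before = None
--     for k, v in seq_to_line.items():
--         if sv is None and k == seq_start:
--             sv = v
--         if ev is None and k == seq_end:
--             ev = v
--         if k >= seq_start and (after is None or k < after[0]):
--             after = (k, v)
--         if k <= seq_end and (before is None or before[0] < k):
--             before = (k, v)
--     start_line = sv if sv is not None else (after[1] if after is not None else None)
--     end_line = ev if ev is not None else (before[1] if before is not None else None)
--     if start_line is None or end_line is None:
--         return ""
--     return f"L{min(start_line, end_line)}-L{max(start_line, end_line)}"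
-- ===== Notes on version B (the rewrite author's own statement) =====
-- stated objective: alternative
-- what changed: Replaces the two filtered key-list comprehensions with min()/max() plus re-lookups by a single pass over the dict items that tracks the direct hits and the nearest at-or-after/at-or-before (key, value) pairs as running candidates.
import Mathlib
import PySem

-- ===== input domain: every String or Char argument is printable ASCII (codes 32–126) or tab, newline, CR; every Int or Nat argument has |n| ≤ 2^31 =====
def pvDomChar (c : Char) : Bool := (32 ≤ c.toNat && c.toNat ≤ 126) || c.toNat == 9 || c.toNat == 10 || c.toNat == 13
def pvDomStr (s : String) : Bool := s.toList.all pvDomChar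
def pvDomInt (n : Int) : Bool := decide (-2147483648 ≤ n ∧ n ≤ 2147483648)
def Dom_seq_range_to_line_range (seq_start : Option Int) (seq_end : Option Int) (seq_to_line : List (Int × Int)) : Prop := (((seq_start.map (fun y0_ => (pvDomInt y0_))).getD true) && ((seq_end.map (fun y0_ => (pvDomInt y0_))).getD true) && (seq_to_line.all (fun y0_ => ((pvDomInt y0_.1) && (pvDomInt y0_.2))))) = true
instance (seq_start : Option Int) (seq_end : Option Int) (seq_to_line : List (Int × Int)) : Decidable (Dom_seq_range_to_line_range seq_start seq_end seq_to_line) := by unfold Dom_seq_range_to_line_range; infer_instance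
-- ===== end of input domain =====

-- B replaces A's filtered key lists + min()/max() + re-lookup with one pass over the
-- items that tracks the direct hits and the nearest at-or-after / at-or-before pairs.

-- ===== PORT A =====
def seq_range_to_line_range (seq_start : Option Int) (seq_end : Option Int) (seq_to_line : List (Int × Int)) : String :=
  match seq_start, seq_end with
  | none, _ => ""
  | some _, none => ""
  | some ss, some se =>
    if seq_to_line.isEmpty then "" else
    let d := PySem.Dict.mk seq_to_line
    let start_line0 := d.get? ss
    let end_line0 := d.get? se
    let start_line :=
      match start_line0 with
      | some v => some v
      | none =>
        -- [s for s in seq_to_line if s >= seq_start]; then seq_to_line[min(...)]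
        let seqs_at_or_after := d.keys.filter (fun s => decide (ss ≤ s))
        match PySem.List.min? seqs_at_or_after (fun x => x) with
        | some m => d.get? m
        | none => none
    let end_line :=
      match end_line0 with
      | some v => some v
      | none =>
        let seqs_at_or_before := d.keys.filter (fun s => decide (s ≤ se))
        match PySem.List.max? seqs_at_or_before (fun x => x) with
        | some m => d.get? m
        | none => none
    match start_line, end_line with
    | some a, some b =>
      let p := if b < a then (b, a) else (a, b)
      "L" ++ PySem.Int.toStr p.1 ++ "-L" ++ PySem.Int.toStr p.2
    | _, _ => ""

-- ===== PORT B =====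
-- loop body of Source B: update (sv, ev, after, before) with one item
def pvStepB (ss se : Int)
    (acc : Option Int × Option Int × Option (Int × Int) × Option (Int × Int))
    (kv : Int × Int) :
    Option Int × Option Int × Option (Int × Int) × Option (Int × Int) :=
  let sv := if acc.1 = none ∧ kv.1 = ss then some kv.2 else acc.1
  let ev := if acc.2.1 = none ∧ kv.1 = se then some kv.2 else acc.2.1
  -- 'k >= seq_start and (after is None or k < after[0])' with short-circuit kept
  let after := if ss ≤ kv.1 then
      (match acc.2.2.1 with
       | none => some kv
       | some a => if kv.1 < a.1 then some kv else some a)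
    else acc.2.2.1
  let before := if kv.1 ≤ se then
      (match acc.2.2.2 with
       | none => some kv
       | some b => if b.1 < kv.1 then some kv else some b)
    else acc.2.2.2
  (sv, ev, after, before)

def seq_range_to_line_range_alt (seq_start : Option Int) (seq_end : Option Int) (seq_to_line : List (Int × Int)) : String :=
  -- 'if seq_start is None or seq_end is None or not seq_to_line: return ""'
  match seq_start with
  | none => ""
  | some ss =>
    match seq_end with
    | none => ""
    | some se =>
        if seq_to_line.isEmpty then "" else
        let r := seq_to_line.foldl (pvStepB ss se) (none, none, none, none)
        let start_line := match r.1 with | none => r.2.2.1.map Prod.snd | some v => some v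
        let end_line := match r.2.1 with | none => r.2.2.2.map Prod.snd | some v => some v
        match start_line with
        | none => ""
        | some a =>
          match end_line with
          | none => ""
          | some b => "L" ++ PySem.Int.toStr (min a b) ++ "-L" ++ PySem.Int.toStr (max a b)

-- ===== PRECONDITION & SPEC =====
def Spec_seq_range_to_line_range (seq_start : Option Int) (seq_end : Option Int) (seq_to_line : List (Int × Int)) (out : String) : Prop := out = seq_range_to_line_range_alt seq_start seq_end seq_to_line
instance (seq_start : Option Int) (seq_end : Option Int) (seq_to_line : List (Int × Int)) (out : String) : Decidable (Spec_seq_range_to_line_range seq_start seq_end seq_to_line out) := by unfold Spec_seq_range_to_line_range; infer_instance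

-- ===== CLAIM (what is proved, stated in full; the proofs are below) =====
def Claim_equal_seq_range_to_line_range : Prop := ∀ (seq_start : Option Int) (seq_end : Option Int) (seq_to_line : List (Int × Int)), Dom_seq_range_to_line_range seq_start seq_end seq_to_line → Spec_seq_range_to_line_range seq_start seq_end seq_to_line (seq_range_to_line_range seq_start seq_end seq_to_line)

-- ===== LEMMAS AND PROOFS =====

-- first-of-two combinator (direct-hit component): keep the first some
def pvOr (a b : Option Int) : Option Int := match a with | some x => some x | none => b

-- argmin-by-key with left (earlier) preference
def pvCMin (a b : Option (Int × Int)) : Option (Int × Int) :=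
  match a, b with
  | none, b => b
  | some x, none => some x
  | some x, some y => if y.1 < x.1 then some y else some x

-- argmax-by-key with left (earlier) preference
def pvCMax (a b : Option (Int × Int)) : Option (Int × Int) :=
  match a, b with
  | none, b => b
  | some x, none => some x
  | some x, some y => if x.1 < y.1 then some y else some x

theorem pvOr_assoc (a b c : Option Int) : pvOr (pvOr a b) c = pvOr a (pvOr b c) := by
  cases a <;> simp [pvOr]

theorem pvCMin_assoc (a b c : Option (Int × Int)) :
    pvCMin (pvCMin a b) c = pvCMin a (pvCMin b c) := by
  rcases a with _ | ⟨ak, av⟩ <;> rcases b with _ | ⟨bk, bv⟩ <;> rcases c with _ | ⟨ck, cv⟩ <;>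
    try rfl
  · by_cases h1 : bk < ak <;> simp [pvCMin, h1]
  · by_cases h1 : bk < ak <;> by_cases h2 : ck < bk <;> by_cases h3 : ck < ak <;>
      simp [pvCMin, h1, h2, h3] <;> first | rfl | (exfalso; omega)

theorem pvCMax_assoc (a b c : Option (Int × Int)) :
    pvCMax (pvCMax a b) c = pvCMax a (pvCMax b c) := by
  rcases a with _ | ⟨ak, av⟩ <;> rcases b with _ | ⟨bk, bv⟩ <;> rcases c with _ | ⟨ck, cv⟩ <;>
    try rfl
  · by_cases h1 : ak < bk <;> simp [pvCMax, h1]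
  · by_cases h1 : ak < bk <;> by_cases h2 : bk < ck <;> by_cases h3 : ak < ck <;>
      simp [pvCMax, h1, h2, h3] <;> first | rfl | (exfalso; omega)

-- purely recursive versions of the candidate-tracking components
def pvAfter (ss : Int) : List (Int × Int) → Option (Int × Int)
  | [] => none
  | kv :: t => pvCMin (if ss ≤ kv.1 then some kv else none) (pvAfter ss t)

def pvBefore (se : Int) : List (Int × Int) → Option (Int × Int)
  | [] => none
  | kv :: t => pvCMax (if kv.1 ≤ se then some kv else none) (pvBefore se t)

-- one step of B's fold is the three combinators applied to the item's contribution
theorem pvStepB_eq (ss se : Int) (acc : Option Int × Option Int × Option (Int × Int) × Option (Int × Int))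
    (kv : Int × Int) :
    pvStepB ss se acc kv =
      (pvOr acc.1 (if kv.1 = ss then some kv.2 else none),
       pvOr acc.2.1 (if kv.1 = se then some kv.2 else none),
       pvCMin acc.2.2.1 (if ss ≤ kv.1 then some kv else none),
       pvCMax acc.2.2.2 (if kv.1 ≤ se then some kv else none)) := by
  obtain ⟨sv, ev, af, bf⟩ := acc
  simp only [pvStepB, pvOr, pvCMin, pvCMax]
  refine Prod.ext ?_ (Prod.ext ?_ (Prod.ext ?_ ?_)) <;>
    cases sv <;> cases ev <;> cases af <;> cases bf <;>
    simp <;> split_ifs <;> simp_all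

theorem pvOr_hit (k s v : Int) (y : Option Int) :
    pvOr (if k = s then some v else none) y = if (k == s) = true then some v else y := by
  by_cases h : k = s <;> simp [pvOr, h]

-- characterization of B's fold from an arbitrary accumulator
theorem pvFold_char (ss se : Int) (l : List (Int × Int))
    (acc : Option Int × Option Int × Option (Int × Int) × Option (Int × Int)) :
    l.foldl (pvStepB ss se) acc =
      (pvOr acc.1 ((PySem.Dict.mk l).get? ss),
       pvOr acc.2.1 ((PySem.Dict.mk l).get? se),
       pvCMin acc.2.2.1 (pvAfter ss l),
       pvCMax acc.2.2.2 (pvBefore se l)) := by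
  induction l generalizing acc with
  | nil =>
    obtain ⟨sv, ev, af, bf⟩ := acc
    cases sv <;> cases ev <;> cases af <;> cases bf <;>
      simp [pvOr, pvCMin, pvCMax, pvAfter, pvBefore, PySem.Dict.get?]
  | cons kv t ih =>
    obtain ⟨k, v⟩ := kv
    rw [List.foldl_cons, pvStepB_eq, ih]
    refine Prod.ext ?_ (Prod.ext ?_ (Prod.ext ?_ ?_)) <;>
      simp only [pvAfter, pvBefore, PySem.Dict.get?_mk_cons, pvOr_assoc, pvCMin_assoc,
        pvCMax_assoc, pvOr_hit]

-- A-side characterization: min of the filtered keys + first-match lookup IS pvAfter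
theorem pvFoldlMin_comm (k x : Int) (t : List Int) :
    t.foldl min (min k x) = min k (t.foldl min x) := by
  induction t generalizing x with
  | nil => rfl
  | cons y t ih => simp only [List.foldl_cons]; rw [min_assoc, ih]

theorem pvFoldlMax_comm (k x : Int) (t : List Int) :
    t.foldl max (max k x) = max k (t.foldl max x) := by
  induction t generalizing x with
  | nil => rfl
  | cons y t ih => simp only [List.foldl_cons]; rw [max_assoc, ih]

theorem pvGet?_isSome (t : List (Int × Int)) (m : Int) (hm : m ∈ t.map Prod.fst) :
    ∃ w, (PySem.Dict.mk t).get? m = some w := by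
  cases h : (PySem.Dict.mk t).get? m with
  | some w => exact ⟨w, rfl⟩
  | none =>
    exfalso
    exact ((PySem.Dict.get?_eq_none_iff_not_mem_keys _ _).mp h) (by simpa [PySem.Dict.keys] using hm)
  
theorem pvAfter_char (ss : Int) (l : List (Int × Int)) :
    pvAfter ss l =
      (PySem.List.min? ((l.map Prod.fst).filter (fun s => decide (ss ≤ s))) (fun x => x)).bind
        (fun m => ((PySem.Dict.mk l).get? m).map (fun v => (m, v))) := by
  induction l with
  | nil => rfl
  | cons kv t ih =>
    obtain ⟨k, v⟩ := kv
    by_cases hk : ss ≤ k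
    · have hf : (((k, v) :: t).map Prod.fst).filter (fun s => decide (ss ≤ s))
          = k :: ((t.map Prod.fst).filter (fun s => decide (ss ≤ s))) := by
        simp [hk]
      rw [hf]
      cases hF : (t.map Prod.fst).filter (fun s => decide (ss ≤ s)) with
      | nil =>
        have ht : pvAfter ss t = none := by
          rw [ih, hF, (PySem.List.min?_eq_none_iff _ _).mpr rfl, Option.bind_none]
        rw [PySem.List.min?_id_cons]
        simp only [pvAfter, ht, List.foldl_nil, Option.bind_some,
          PySem.Dict.get?_mk_cons, BEq.rfl, if_pos hk, pvCMin]
        rfl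
      | cons x0 t' =>
        have hm' : PySem.List.min? ((t.map Prod.fst).filter (fun s => decide (ss ≤ s))) (fun x => x)
            = some (t'.foldl min x0) := by rw [hF, PySem.List.min?_id_cons]
        obtain ⟨w, hw⟩ := pvGet?_isSome t (t'.foldl min x0) (by
          have := PySem.List.min?_mem hm'
          exact (List.mem_filter.mp this).1)
        have ht : pvAfter ss t = some (t'.foldl min x0, w) := by
          rw [ih, hm', Option.bind_some, hw]; rfl
        rw [PySem.List.min?_id_cons, List.foldl_cons, pvFoldlMin_comm]
        simp only [pvAfter, ht, if_pos hk, pvCMin, Option.bind_some]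
        by_cases hlt : t'.foldl min x0 < k
        · have hne : (k == t'.foldl min x0) = false := by simp; omega
          have hmin : min k (t'.foldl min x0) = t'.foldl min x0 := by omega
          rw [if_pos hlt, hmin, PySem.Dict.get?_mk_cons, hne]
          simp [hw]
        · have hmin : min k (t'.foldl min x0) = k := by omega
          rw [if_neg hlt, hmin, PySem.Dict.get?_mk_cons]
          simp
    · have hf : (((k, v) :: t).map Prod.fst).filter (fun s => decide (ss ≤ s))
          = (t.map Prod.fst).filter (fun s => decide (ss ≤ s)) := by
        simp [hk]
      rw [hf]
      have hL : pvAfter ss ((k, v) :: t) = pvAfter ss t := by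
        simp only [pvAfter, if_neg hk, pvCMin]
      rw [hL, ih]
      cases hm : PySem.List.min? ((t.map Prod.fst).filter (fun s => decide (ss ≤ s))) (fun x => x) with
      | none => rfl
      | some m =>
        have hssm : ss ≤ m := by
          have := (List.mem_filter.mp (PySem.List.min?_mem hm)).2
          simpa using this
        have hne : (k == m) = false := by simp; omega
        simp only [Option.bind_some, PySem.Dict.get?_mk_cons, hne]
        rfl

theorem pvBefore_char (se : Int) (l : List (Int × Int)) :
    pvBefore se l =
      (PySem.List.max? ((l.map Prod.fst).filter (fun s => decide (s ≤ se))) (fun x => x)).bind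
        (fun m => ((PySem.Dict.mk l).get? m).map (fun v => (m, v))) := by
  induction l with
  | nil => rfl
  | cons kv t ih =>
    obtain ⟨k, v⟩ := kv
    by_cases hk : k ≤ se
    · have hf : (((k, v) :: t).map Prod.fst).filter (fun s => decide (s ≤ se))
          = k :: ((t.map Prod.fst).filter (fun s => decide (s ≤ se))) := by
        simp [hk]
      rw [hf]
      cases hF : (t.map Prod.fst).filter (fun s => decide (s ≤ se)) with
      | nil =>
        have ht : pvBefore se t = none := by
          rw [ih, hF, (PySem.List.max?_eq_none_iff _ _).mpr rfl, Option.bind_none]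
        rw [PySem.List.max?_id_cons]
        simp only [pvBefore, ht, List.foldl_nil, Option.bind_some,
          PySem.Dict.get?_mk_cons, BEq.rfl, if_pos hk, pvCMax]
        rfl
      | cons x0 t' =>
        have hm' : PySem.List.max? ((t.map Prod.fst).filter (fun s => decide (s ≤ se))) (fun x => x)
            = some (t'.foldl max x0) := by rw [hF, PySem.List.max?_id_cons]
        obtain ⟨w, hw⟩ := pvGet?_isSome t (t'.foldl max x0) (by
          have := PySem.List.max?_mem hm'
          exact (List.mem_filter.mp this).1)
        have ht : pvBefore se t = some (t'.foldl max x0, w) := by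
          rw [ih, hm', Option.bind_some, hw]; rfl
        rw [PySem.List.max?_id_cons, List.foldl_cons, pvFoldlMax_comm]
        simp only [pvBefore, ht, if_pos hk, pvCMax, Option.bind_some]
        by_cases hlt : k < t'.foldl max x0
        · have hne : (k == t'.foldl max x0) = false := by simp; omega
          have hmax : max k (t'.foldl max x0) = t'.foldl max x0 := by omega
          rw [if_pos hlt, hmax, PySem.Dict.get?_mk_cons, hne]
          simp [hw]
        · have hmax : max k (t'.foldl max x0) = k := by omega
          rw [if_neg hlt, hmax, PySem.Dict.get?_mk_cons]
          simp
    · have hf : (((k, v) :: t).map Prod.fst).filter (fun s => decide (s ≤ se))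
          = (t.map Prod.fst).filter (fun s => decide (s ≤ se)) := by
        simp [hk]
      rw [hf]
      have hL : pvBefore se ((k, v) :: t) = pvBefore se t := by
        simp only [pvBefore, if_neg hk, pvCMax]
      rw [hL, ih]
      cases hm : PySem.List.max? ((t.map Prod.fst).filter (fun s => decide (s ≤ se))) (fun x => x) with
      | none => rfl
      | some m =>
        have hsem : m ≤ se := by
          have := (List.mem_filter.mp (PySem.List.max?_mem hm)).2
          simpa using this
        have hne : (k == m) = false := by simp; omega
        simp only [Option.bind_some, PySem.Dict.get?_mk_cons, hne]
        rfl

-- collapsing the tracked (key, value) candidate to the plain lookup A performs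
theorem pvSndCollapse (mo : Option Int) (g : Int → Option Int) :
    (mo.bind (fun m => (g m).map (fun v => (m, v)))).map Prod.snd
      = match mo with | some m => g m | none => none := by
  cases mo with
  | none => rfl
  | some m => cases g m <;> simp

-- the swap-then-format tail equals formatting min/max
theorem pvFmt_eq (x y : Option Int) :
    (match x, y with
     | some a, some b =>
       (let p := if b < a then (b, a) else (a, b);
        "L" ++ PySem.Int.toStr p.1 ++ "-L" ++ PySem.Int.toStr p.2)
     | _, _ => "") =
    (match x with
     | none => ""
     | some a =>
       match y with
       | none => ""
       | some b => "L" ++ PySem.Int.toStr (min a b) ++ "-L" ++ PySem.Int.toStr (max a b)) := by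
  cases x with
  | none => rfl
  | some a => cases y with
    | none => rfl
    | some b =>
      by_cases hba : b < a
      · have h1 : min a b = b := by omega
        have h2 : max a b = a := by omega
        simp [hba, h1, h2]
      · have h1 : min a b = a := by omega
        have h2 : max a b = b := by omega
        simp [hba, h1, h2]

-- ===== VERDICT (by name: the statement is the Claim_ definition above) =====
theorem seq_range_to_line_range_spec : Claim_equal_seq_range_to_line_range := by
  intro ss se l _
  unfold Spec_seq_range_to_line_range
  cases ss with
  | none => rfl
  | some ss => cases se with
    | none => rfl
    | some se =>
      simp only [seq_range_to_line_range, seq_range_to_line_range_alt]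
      by_cases hl : l.isEmpty
      · simp [hl]
      · simp only [hl, Bool.false_eq_true, if_false]
        have hkeys : (PySem.Dict.mk l).keys = l.map Prod.fst := rfl
        rw [pvFold_char, hkeys, pvAfter_char, pvBefore_char]
        simp only [pvOr, pvCMin, pvCMax, pvSndCollapse]
        have hswap : ∀ (o e : Option Int),
            (match o with | none => e | some v => some v)
              = (match o with | some v => some v | none => e) := by
          intro o e; cases o <;> rfl
        rw [hswap, hswap]
        exact pvFmt_eq _ _
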